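-- pv_equiv track=rewrite | github.com/radicalTiki/AdventOfCode20 | AdventCode/AOC6/main.py | coalesce_questions
-- ===== SOURCE A (Python) =====
-- def coalesce_questions(check):
--     group_questions = []
--     coalesce = []
--     person_count = 0
--     for entry in check:
--         if entry == '':
--             # new line add questions to group questions
--             group_questions.append([coalesce, person_count])
--             coalesce = []
--             person_count = 0
--         else:
--             person_count += 1
--             for item in entry:
--                 coalesce.append(item)
--     return group_questions
-- ===== SOURCE B (Python) =====
-- def coalesce_questions(check):
--     # Repeatedly cut off everything before the next blank line ('') as one group;
--     # stop when no blank remains (the unterminated trailing segment is discarded).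
--     def split_first(xs):
--         for i, e in enumerate(xs):
--             if e == '':
--                 return xs[:i], xs[i + 1:]
--         return None
--
--     out = []
--     rest = check
--     while True:
--         sp = split_first(rest)
--         if sp is None:
--             return out
--         seg, rest = sp
--         out.append([list(''.join(seg)), len(seg)])
-- ===== Notes on version B (the rewrite author's own statement) =====
-- stated objective: alternative
-- what changed: B repeatedly locates the next blank line and slices off the preceding segment (a split-at-first-delimiter loop over whole segments), mapping each segment to its joined character list and line count, instead of A's single fold that appends characters one by one and counts entries.
import Mathlib
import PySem

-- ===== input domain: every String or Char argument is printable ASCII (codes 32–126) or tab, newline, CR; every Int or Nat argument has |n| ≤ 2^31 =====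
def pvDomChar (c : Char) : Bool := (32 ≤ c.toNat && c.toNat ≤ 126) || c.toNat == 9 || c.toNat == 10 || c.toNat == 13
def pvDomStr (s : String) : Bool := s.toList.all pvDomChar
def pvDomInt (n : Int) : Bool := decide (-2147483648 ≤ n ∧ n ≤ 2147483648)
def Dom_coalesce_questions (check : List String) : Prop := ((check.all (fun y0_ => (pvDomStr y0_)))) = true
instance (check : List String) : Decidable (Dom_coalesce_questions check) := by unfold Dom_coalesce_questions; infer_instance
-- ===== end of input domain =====

-- B re-decomposes the task: instead of A's single entry-by-entry fold with a character
-- accumulator and counter, it repeatedly splits off the segment before the next blank line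
-- and maps each whole segment to (its character list, its length); same cost, alternative shape.

-- ===== PORT A =====
-- loop state: (group_questions, coalesce, person_count)
def coalesceStepA (s : List (List String × Int) × List String × Int) (entry : String) :
    List (List String × Int) × List String × Int :=
  if entry == "" then (s.1 ++ [(s.2.1, s.2.2)], [], 0)
  else (s.1, s.2.1 ++ entry.toList.map (fun c => String.mk [c]), s.2.2 + 1)

def coalesce_questions (check : List String) : List (List String × Int) :=
  (check.foldl coalesceStepA ([], [], 0)).1

-- ===== PORT B =====
-- split_first: the entries before the first '', and the entries after it (none if no '')
def splitFirstBlank : List String → Option (List String × List String)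
  | [] => none
  | e :: rest =>
    if e = "" then some ([], rest)
    else (splitFirstBlank rest).map (fun p => (e :: p.1, p.2))

theorem splitFirstBlank_length : ∀ (xs seg rest : List String),
    splitFirstBlank xs = some (seg, rest) → rest.length < xs.length := by
  intro xs
  induction xs with
  | nil => intro seg rest h; simp [splitFirstBlank] at h
  | cons e tl ih =>
    intro seg rest h
    by_cases he : e = ""
    · simp [splitFirstBlank, he] at h
      simp [← h.2]
    · rw [splitFirstBlank, if_neg he, Option.map_eq_some_iff] at h
      obtain ⟨⟨a, b⟩, hp, hpair⟩ := h
      have hrb : b = rest := by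
        have := congrArg Prod.snd hpair; simpa using this
      subst hrb
      simpa using Nat.lt_succ_of_lt (ih a b hp)

-- list(''.join(seg)): each character of the joined segment as a one-char string
def segJoinChars (seg : List String) : List String :=
  (seg.flatMap String.toList).map (fun c => String.mk [c])

def coalesce_questions_alt (check : List String) : List (List String × Int) :=
  match h : splitFirstBlank check with
  | none => []
  | some (seg, rest) =>
    (segJoinChars seg, (seg.length : Int)) :: coalesce_questions_alt rest
termination_by check.length
decreasing_by exact splitFirstBlank_length check seg rest h

-- ===== PRECONDITION & SPEC =====
def Spec_coalesce_questions (check : List String) (out : List (List String × Int)) : Prop := out = coalesce_questions_alt check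
instance (check : List String) (out : List (List String × Int)) : Decidable (Spec_coalesce_questions check out) := by unfold Spec_coalesce_questions; infer_instance

-- ===== CLAIM (what is proved, stated in full; the proofs are below) =====
def Claim_equal_coalesce_questions : Prop := ∀ (check : List String), Dom_coalesce_questions check → Spec_coalesce_questions check (coalesce_questions check)

-- ===== LEMMAS AND PROOFS =====
theorem splitFirstBlank_noblank_append (cur ys : List String) (hcur : ∀ x ∈ cur, x ≠ "") :
    splitFirstBlank (cur ++ ys) = (splitFirstBlank ys).map (fun p => (cur ++ p.1, p.2)) := by
  induction cur with
  | nil => cases h : splitFirstBlank ys <;> simp [h]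
  | cons e tl ih =>
    have he : e ≠ "" := hcur e (by simp)
    have ih' := ih (fun x hx => hcur x (by simp [hx]))
    simp [splitFirstBlank, he, ih']
    cases h : splitFirstBlank ys <;> simp

theorem coalesce_fold_agree (check : List String) (acc : List (List String × Int))
    (cur : List String) (hcur : ∀ x ∈ cur, x ≠ "") :
    (check.foldl coalesceStepA (acc, segJoinChars cur, (cur.length : Int))).1
      = acc ++ coalesce_questions_alt (cur ++ check) := by
  induction check generalizing acc cur with
  | nil =>
    have : splitFirstBlank cur = none := by
      simpa using splitFirstBlank_noblank_append cur [] hcur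
    rw [List.foldl_nil, List.append_nil, coalesce_questions_alt]
    split
    · simp
    · rename_i seg r hsome
      rw [this] at hsome
      cases hsome
  | cons entry rest ih =>
    by_cases h : entry = ""
    · subst h
      have hsplit : splitFirstBlank (cur ++ "" :: rest) = some (cur, rest) := by
        simp [splitFirstBlank_noblank_append cur ("" :: rest) hcur, splitFirstBlank]
      rw [coalesce_questions_alt]
      split
      · rename_i hnone
        rw [hsplit] at hnone
        cases hnone
      · rename_i seg' rest' hsome
        rw [hsplit] at hsome
        injection hsome with hsome
        cases hsome
        have := ih (acc ++ [(segJoinChars cur, (cur.length : Int))]) [] (by simp)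
        simpa [coalesceStepA, segJoinChars] using this
    · have hcur' : ∀ x ∈ cur ++ [entry], x ≠ "" := by
        intro x hx
        rcases List.mem_append.mp hx with hx | hx
        · exact hcur x hx
        · simp at hx; simpa [hx] using h
      have := ih acc (cur ++ [entry]) hcur'
      simpa [coalesceStepA, h, segJoinChars, List.flatMap_append] using this

-- ===== VERDICT (by name: the statement is the Claim_ definition above) =====
theorem coalesce_questions_spec : Claim_equal_coalesce_questions := by
  intro check _
  unfold Spec_coalesce_questions coalesce_questions
  simpa [segJoinChars] using coalesce_fold_agree check [] [] (by simp)
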